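-- pv_equiv track=rewrite | github.com/jeaninek74/PMBlueprints | platform_integrations.py | _convert_excel_to_monday_formula
-- ===== SOURCE A (Python) =====
-- def _convert_excel_to_monday_formula(excel_formula: str) -> str:
--     """Convert Excel formula to Monday.com formula format"""
--
--     # Basic formula conversion mapping
--     conversions = {
--         'SUM': 'SUM',
--         'AVERAGE': 'AVERAGE',
--         'COUNT': 'COUNT',
--         'IF': 'IF',
--         'VLOOKUP': 'LOOKUP',
--         'TODAY': 'TODAY',
--         'NOW': 'NOW'
--     }
--
--     monday_formula = excel_formula
--     for excel_func, monday_func in conversions.items():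
--         monday_formula = monday_formula.replace(excel_func, monday_func)
--
--     return monday_formula
-- ===== SOURCE B (Python) =====
-- def _convert_excel_to_monday_formula(excel_formula: str) -> str:
--     """Convert Excel formula to Monday.com formula format (single left-to-right scan)."""
--     table = (
--         ('SUM', 'SUM'),
--         ('AVERAGE', 'AVERAGE'),
--         ('COUNT', 'COUNT'),
--         ('IF', 'IF'),
--         ('VLOOKUP', 'LOOKUP'),
--         ('TODAY', 'TODAY'),
--         ('NOW', 'NOW'),
--     )
--     out = []
--     i = 0
--     n = len(excel_formula)
--     while i < n:
--         for src, dst in table: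
--             if excel_formula.startswith(src, i):
--                 out.append(dst)
--                 i += len(src)
--                 break
--         else:
--             out.append(excel_formula[i])
--             i += 1
--     return ''.join(out)
-- ===== Notes on version B (the rewrite author's own statement) =====
-- stated objective: alternative
-- what changed: Replaces A's seven sequential full-string str.replace passes with one left-to-right scan that, at each position, matches any of the seven keywords and substitutes it in place (identity keys copied, VLOOKUP mapped to LOOKUP).
import Mathlib
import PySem

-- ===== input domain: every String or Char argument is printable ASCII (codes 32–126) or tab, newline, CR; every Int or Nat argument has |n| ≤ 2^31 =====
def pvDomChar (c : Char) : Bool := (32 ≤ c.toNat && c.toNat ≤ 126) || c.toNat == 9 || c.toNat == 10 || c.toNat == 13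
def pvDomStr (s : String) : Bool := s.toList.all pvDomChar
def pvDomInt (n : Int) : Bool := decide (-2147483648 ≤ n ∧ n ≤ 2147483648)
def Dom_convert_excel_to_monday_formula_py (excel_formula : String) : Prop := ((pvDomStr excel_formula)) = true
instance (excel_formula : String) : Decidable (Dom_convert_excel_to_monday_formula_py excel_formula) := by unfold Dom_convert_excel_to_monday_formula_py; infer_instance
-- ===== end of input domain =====

-- B replaces A's seven sequential full-string replace passes with a single left-to-right
-- scan substituting each recognized keyword in place (alternative decomposition, same result).

-- ===== PORT A =====
-- the dict 'conversions' as an association list in insertion order, iterated like .items()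
def pvConversions : List (String × String) :=
  [("SUM", "SUM"), ("AVERAGE", "AVERAGE"), ("COUNT", "COUNT"), ("IF", "IF"),
   ("VLOOKUP", "LOOKUP"), ("TODAY", "TODAY"), ("NOW", "NOW")]

def convert_excel_to_monday_formula_py (excel_formula : String) : String :=
  pvConversions.foldl (fun monday_formula p => PySem.Str.replace monday_formula p.1 p.2) excel_formula

-- ===== PORT B =====
-- the tuple 'table' of (src, dst) pairs, as lists of code points
def pvTable : List (List Char × List Char) :=
  [("SUM".toList, "SUM".toList), ("AVERAGE".toList, "AVERAGE".toList),
   ("COUNT".toList, "COUNT".toList), ("IF".toList, "IF".toList),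
   ("VLOOKUP".toList, "LOOKUP".toList), ("TODAY".toList, "TODAY".toList),
   ("NOW".toList, "NOW".toList)]

theorem pvTable_key_pos : ∀ p ∈ pvTable, 0 < p.1.length := by decide

-- the while loop over index i, with the inner for/break: find? is the first matching (src, dst)
def pvScan (l : List Char) : List Char :=
  match hf : pvTable.find? (fun p => p.1.isPrefixOf l) with
  | some p => p.2 ++ pvScan (l.drop p.1.length)
  | none =>
    match l with
    | [] => []
    | c :: t => c :: pvScan t
termination_by l.length
decreasing_by
  · have hp := List.mem_of_find?_eq_some hf
    have hpre : p.1 <+: l := by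
      have := List.find?_some hf
      simpa [List.isPrefixOf_iff_prefix] using this
    have h1 := pvTable_key_pos p hp
    have h2 := hpre.length_le
    simp only [List.length_drop]
    omega
  · simp

def convert_excel_to_monday_formula_py_alt (excel_formula : String) : String :=
  String.ofList (pvScan excel_formula.toList)

-- ===== PRECONDITION & SPEC =====
def Spec_convert_excel_to_monday_formula_py (excel_formula : String) (out : String) : Prop := out = convert_excel_to_monday_formula_py_alt excel_formula
instance (excel_formula : String) (out : String) : Decidable (Spec_convert_excel_to_monday_formula_py excel_formula out) := by unfold Spec_convert_excel_to_monday_formula_py; infer_instance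

-- ===== CLAIM (what is proved, stated in full; the proofs are below) =====
def Claim_equal_convert_excel_to_monday_formula_py : Prop := ∀ (excel_formula : String), Dom_convert_excel_to_monday_formula_py excel_formula → Spec_convert_excel_to_monday_formula_py excel_formula (convert_excel_to_monday_formula_py excel_formula)

-- ===== LEMMAS AND PROOFS =====

-- reference one-pass replacement of "VLOOKUP" by "LOOKUP": the common semantics both ports reach
def pvSimple : List Char → List Char
  | [] => []
  | c :: t =>
    if "VLOOKUP".toList.isPrefixOf (c :: t) then
      "LOOKUP".toList ++ pvSimple ((c :: t).drop 7)
    else c :: pvSimple t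
termination_by l => l.length
decreasing_by
  · simp
  · simp

-- replace.go with old = new is the identity (A's six identity passes)
theorem pvGo_self (old : List Char) :
    ∀ (fuel : Nat) (l acc : List Char),
      PySem.Chars.replace.go old old fuel l acc = acc.reverse ++ l := by
  intro fuel
  induction fuel with
  | zero => intro l acc; simp [PySem.Chars.replace.go]
  | succ n ih =>
    intro l acc
    cases l with
    | nil => simp [PySem.Chars.replace.go]
    | cons c t =>
      rw [PySem.Chars.replace.go]
      by_cases hp : old.isPrefixOf (c :: t)
      · have hpre : old <+: (c :: t) := List.isPrefixOf_iff_prefix.mp hp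
        obtain ⟨r, hr⟩ := hpre
        simp only [hp, if_true, ih]
        rw [← hr, List.drop_left]
        simp
      · simp [hp, ih]

theorem pvReplace_self (s old : String) (h : old.toList ≠ []) :
    PySem.Str.replace s old old = s := by
  unfold PySem.Str.replace PySem.Chars.replace
  rw [if_neg (by simp [List.isEmpty_iff, h])]
  rw [pvGo_self old.toList]
  simp

-- replace.go for VLOOKUP→LOOKUP computes pvSimple, given enough fuel
theorem pvGo_eq_simple :
    ∀ (fuel : Nat) (l acc : List Char), l.length ≤ fuel →
      PySem.Chars.replace.go "VLOOKUP".toList "LOOKUP".toList fuel l acc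
        = acc.reverse ++ pvSimple l := by
  intro fuel
  induction fuel with
  | zero =>
    intro l acc hl
    have : l = [] := List.eq_nil_of_length_eq_zero (Nat.le_zero.mp hl)
    subst this
    simp [PySem.Chars.replace.go, pvSimple]
  | succ n ih =>
    intro l acc hl
    cases l with
    | nil => simp [PySem.Chars.replace.go, pvSimple]
    | cons c t =>
      rw [PySem.Chars.replace.go]
      by_cases hp : ("VLOOKUP".toList).isPrefixOf (c :: t) = true
      · rw [if_pos hp]
        rw [ih _ _ (by simp at hl ⊢; omega)]
        rw [pvSimple, if_pos hp]
        simp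
      · rw [if_neg hp]
        rw [ih _ _ (by simp at hl ⊢; omega)]
        rw [pvSimple, if_neg hp]
        simp

-- pvSimple copies a char that cannot start a VLOOKUP occurrence
theorem pvSimple_cons_ne (c : Char) (t : List Char) (h : c ≠ 'V') :
    pvSimple (c :: t) = c :: pvSimple t := by
  rw [pvSimple, if_neg ?hb]
  case hb =>
    intro hc
    obtain ⟨u, hu⟩ := List.isPrefixOf_iff_prefix.mp hc
    have h2 : 'V' :: ("LOOKUP".toList ++ u) = c :: t := hu
    exact h (List.cons_eq_cons.mp h2).1.symm

theorem pvSimple_cons_VE (t : List Char) :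
    pvSimple ('V' :: 'E' :: t) = 'V' :: pvSimple ('E' :: t) := by
  rw [pvSimple, if_neg (by simp [List.isPrefixOf])]

-- unfolding pvScan on the two find? outcomes
theorem pvScan_some {l : List Char} {p : List Char × List Char}
    (hf : pvTable.find? (fun p => p.1.isPrefixOf l) = some p) :
    pvScan l = p.2 ++ pvScan (l.drop p.1.length) := by
  rw [pvScan]
  split
  · rename_i p' hf'
    rw [hf'] at hf
    cases hf
    rfl
  · rename_i hf'
    rw [hf'] at hf
    cases hf

theorem pvScan_none_nil
    (hf : pvTable.find? (fun p => p.1.isPrefixOf ([] : List Char)) = none) :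
    pvScan [] = [] := by
  rw [pvScan]
  split
  · rename_i p' hf'
    rw [hf'] at hf
    cases hf
  · rfl

theorem pvScan_none_cons {c : Char} {t : List Char}
    (hf : pvTable.find? (fun p => p.1.isPrefixOf (c :: t)) = none) :
    pvScan (c :: t) = c :: pvScan t := by
  rw [pvScan]
  split
  · rename_i p' hf'
    rw [hf'] at hf
    cases hf
  · rfl

-- the one-pass keyword scan computes the same replacement
theorem pvScan_eq_simple : ∀ (l : List Char), pvScan l = pvSimple l := by
  intro l
  induction hn : l.length using Nat.strong_induction_on generalizing l with
  | _ n ih =>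
  subst hn
  cases hf : pvTable.find? (fun p => p.1.isPrefixOf l) with
  | none =>
    have hall := List.find?_eq_none.mp hf
    cases l with
    | nil => rw [pvScan_none_nil hf, pvSimple]
    | cons c t =>
      rw [pvScan_none_cons hf, pvSimple,
          if_neg (by simpa using hall ("VLOOKUP".toList, "LOOKUP".toList) (by decide))]
      rw [ih t.length (by simp) t rfl]
  | some p =>
    have hmem := List.mem_of_find?_eq_some hf
    have hpre : p.1 <+: l := by
      have := List.find?_some hf
      simpa [List.isPrefixOf_iff_prefix] using this
    obtain ⟨r, hr⟩ := hpre
    rw [pvScan_some hf]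
    have hdrop : l.drop p.1.length = r := by rw [← hr, List.drop_left]
    have hihr : pvScan r = pvSimple r := by
      apply ih r.length _ r rfl
      rw [← hr]
      have := pvTable_key_pos p hmem
      simp; omega
    rw [hdrop, hihr, ← hr]
    -- case over which table entry matched
    fin_cases hmem
    · -- SUM
      rw [show ("SUM".toList, "SUM".toList).1 ++ r = 'S' :: 'U' :: 'M' :: r from rfl,
          pvSimple_cons_ne _ _ (by decide), pvSimple_cons_ne _ _ (by decide),
          pvSimple_cons_ne _ _ (by decide)]
      rfl
    · -- AVERAGE
      rw [show ("AVERAGE".toList, "AVERAGE".toList).1 ++ r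
            = 'A' :: 'V' :: 'E' :: 'R' :: 'A' :: 'G' :: 'E' :: r from rfl,
          pvSimple_cons_ne _ _ (by decide), pvSimple_cons_VE,
          pvSimple_cons_ne _ _ (by decide), pvSimple_cons_ne _ _ (by decide),
          pvSimple_cons_ne _ _ (by decide), pvSimple_cons_ne _ _ (by decide),
          pvSimple_cons_ne _ _ (by decide)]
      rfl
    · -- COUNT
      rw [show ("COUNT".toList, "COUNT".toList).1 ++ r = 'C' :: 'O' :: 'U' :: 'N' :: 'T' :: r from rfl,
          pvSimple_cons_ne _ _ (by decide), pvSimple_cons_ne _ _ (by decide),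
          pvSimple_cons_ne _ _ (by decide), pvSimple_cons_ne _ _ (by decide),
          pvSimple_cons_ne _ _ (by decide)]
      rfl
    · -- IF
      rw [show ("IF".toList, "IF".toList).1 ++ r = 'I' :: 'F' :: r from rfl,
          pvSimple_cons_ne _ _ (by decide), pvSimple_cons_ne _ _ (by decide)]
      rfl
    · -- VLOOKUP
      rw [show ("VLOOKUP".toList, "LOOKUP".toList).1 ++ r
            = 'V' :: 'L' :: 'O' :: 'O' :: 'K' :: 'U' :: 'P' :: r from rfl]
      rw [pvSimple, if_pos (by simp [List.isPrefixOf])]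
      rfl
    · -- TODAY
      rw [show ("TODAY".toList, "TODAY".toList).1 ++ r = 'T' :: 'O' :: 'D' :: 'A' :: 'Y' :: r from rfl,
          pvSimple_cons_ne _ _ (by decide), pvSimple_cons_ne _ _ (by decide),
          pvSimple_cons_ne _ _ (by decide), pvSimple_cons_ne _ _ (by decide),
          pvSimple_cons_ne _ _ (by decide)]
      rfl
    · -- NOW
      rw [show ("NOW".toList, "NOW".toList).1 ++ r = 'N' :: 'O' :: 'W' :: r from rfl,
          pvSimple_cons_ne _ _ (by decide), pvSimple_cons_ne _ _ (by decide),
          pvSimple_cons_ne _ _ (by decide)]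
      rfl

-- ===== VERDICT (by name: the statement is the Claim_ definition above) =====
theorem convert_excel_to_monday_formula_py_spec : Claim_equal_convert_excel_to_monday_formula_py := by
  intro s _
  unfold Spec_convert_excel_to_monday_formula_py
  unfold convert_excel_to_monday_formula_py convert_excel_to_monday_formula_py_alt pvConversions
  simp only [List.foldl]
  rw [pvReplace_self _ _ (by decide), pvReplace_self _ _ (by decide),
      pvReplace_self _ _ (by decide), pvReplace_self _ _ (by decide),
      pvReplace_self _ _ (by decide), pvReplace_self _ _ (by decide)]
  rw [pvScan_eq_simple]
  unfold PySem.Str.replace PySem.Chars.replace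
  rw [if_neg (by decide)]
  rw [pvGo_eq_simple _ _ _ le_rfl]
  simp
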